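-- pv_equiv track=rewrite | github.com/venoajie/my-ai-assistant | scripts/validate_personas.py | parse_persona_body
-- ===== SOURCE A (Python) =====
-- from typing import Dict, Any, List
--
-- def parse_persona_body(body_content: str) -> Dict[str, str]:
--     """
--     Parses the body of a persona file into a dictionary of sections
--     without using regular expressions.
--     """
--     sections = {}
--     # Split the body by the opening tag of a section, ignoring anything before the first one.
--     parts = body_content.split("<SECTION:")[1:]
--     for part in parts:
--         try:
--             # The section name is up to the first '>', and the rest is content.
--             name, content = part.split(">", 1)
--             # Clean up the content by removing the closing tag and stripping whitespace.
--             content = content.replace("</SECTION>", "").strip()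
--             sections[name.strip()] = content
--         except ValueError:
--             # Skip any malformed parts that don't contain a '>'.
--             continue
--     return sections
-- ===== SOURCE B (Python) =====
-- def parse_persona_body(body_content: str) -> dict:
--     """Single-pass character-level state machine: scan the string once with a
--     mode (0 = outside any section, 1 = reading a name, 2 = reading content),
--     accumulating name/content characters and flushing a finished section when
--     the next opening tag (or the end of input) is reached."""
--     sections = {}
--     mode = 0
--     name = ""
--     content = ""
--     i = 0
--     n = len(body_content)
--     while i < n:
--         if body_content.startswith("<SECTION:", i):
--             if mode == 2:
--                 sections[name.strip()] = content.strip()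
--             mode, name, content = 1, "", ""
--             i += 9
--         elif mode == 1:
--             if body_content[i] == ">":
--                 mode = 2
--             else:
--                 name += body_content[i]
--             i += 1
--         elif mode == 2:
--             if body_content.startswith("</SECTION>", i):
--                 i += 10
--             else:
--                 content += body_content[i]
--                 i += 1
--         else:
--             i += 1
--     if mode == 2:
--         sections[name.strip()] = content.strip()
--     return sections
-- ===== Notes on version B (the rewrite author's own statement) =====
-- stated objective: alternative
-- what changed: Replaces A's split-the-whole-body-on-the-marker plus per-part two-way split/strip/replace (with try/except) by a single left-to-right character-level state machine with three modes (outside / reading name / reading content) that accumulates characters, skips closing tags on the fly, and flushes a section when the next marker or the end of input arrives.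
import Mathlib
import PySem

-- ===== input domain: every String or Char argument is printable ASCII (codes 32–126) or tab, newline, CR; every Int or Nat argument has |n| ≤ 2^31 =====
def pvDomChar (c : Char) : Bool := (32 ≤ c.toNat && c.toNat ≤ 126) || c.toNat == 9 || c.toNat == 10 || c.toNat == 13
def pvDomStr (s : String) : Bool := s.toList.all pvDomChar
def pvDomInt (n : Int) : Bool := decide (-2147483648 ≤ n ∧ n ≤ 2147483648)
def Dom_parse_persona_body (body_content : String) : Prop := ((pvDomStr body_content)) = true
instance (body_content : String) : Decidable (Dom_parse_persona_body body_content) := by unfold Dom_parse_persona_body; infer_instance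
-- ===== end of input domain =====

-- B replaces A's split-and-unpack by a single-pass three-mode character state machine (alternative decomposition, same cost).

def pvTag : List Char := ['<', 'S', 'E', 'C', 'T', 'I', 'O', 'N', ':']
def pvClose : List Char := ['<', '/', 'S', 'E', 'C', 'T', 'I', 'O', 'N', '>']

-- ===== PORT A =====
-- one iteration of A's for-loop: part.split(">", 1); two pieces → assign, one piece → ValueError is caught, skip
def pvAStep (sections : PySem.Dict String String) (part : List Char) : PySem.Dict String String :=
  match PySem.Chars.splitOnMax part ['>'] 1 with
  | [name, content] =>
      sections.insert (String.ofList (PySem.Chars.strip name))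
        (String.ofList (PySem.Chars.strip (PySem.Chars.replace content pvClose [])))
  | _ => sections

def parse_persona_body (body_content : String) : List (String × String) :=
  (((PySem.Chars.splitOn body_content.toList pvTag).drop 1).foldl pvAStep PySem.Dict.empty).items

-- ===== PORT B =====
-- Source B's while loop over index i, transcribed on the remaining suffix of the string:
-- mode 0 = outside (before the first tag), 1 = reading a name, 2 = reading content;
-- the branch order (opening tag / mode 1 / mode 2 / else) is the Python's.
def pvBAuto (cs : List Char) (mode : Nat) (name content : List Char)
    (sections : PySem.Dict String String) : PySem.Dict String String :=
  match cs with
  | [] =>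
      if mode = 2 then
        sections.insert (String.ofList (PySem.Chars.strip name))
          (String.ofList (PySem.Chars.strip content))
      else sections
  | c :: rest =>
      if pvTag.isPrefixOf (c :: rest) then
        pvBAuto (rest.drop 8) 1 [] []
          (if mode = 2 then
            sections.insert (String.ofList (PySem.Chars.strip name))
              (String.ofList (PySem.Chars.strip content))
          else sections)
      else if mode = 1 then
        if c = '>' then pvBAuto rest 2 name content sections
        else pvBAuto rest 1 (name ++ [c]) content sections
      else if mode = 2 then
        if pvClose.isPrefixOf (c :: rest) then pvBAuto (rest.drop 9) 2 name content sections
        else pvBAuto rest 2 name (content ++ [c]) sections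
      else pvBAuto rest 0 name content sections
termination_by cs.length
decreasing_by
  · simp only [List.length_drop, List.length_cons]; omega
  · simp
  · simp
  · simp only [List.length_drop, List.length_cons]; omega
  · simp
  · simp

def parse_persona_body_alt (body_content : String) : List (String × String) :=
  (pvBAuto body_content.toList 0 [] [] PySem.Dict.empty).items

-- ===== PRECONDITION & SPEC =====
def Spec_parse_persona_body (body_content : String) (out : List (String × String)) : Prop := out = parse_persona_body_alt body_content
instance (body_content : String) (out : List (String × String)) : Decidable (Spec_parse_persona_body body_content out) := by unfold Spec_parse_persona_body; infer_instance

-- ===== CLAIM (what is proved, stated in full; the proofs are below) =====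
def Claim_equal_parse_persona_body : Prop := ∀ (body_content : String), Dom_parse_persona_body body_content → Spec_parse_persona_body body_content (parse_persona_body body_content)

-- ===== LEMMAS AND PROOFS =====

-- find l sub is the unique first-occurrence position
theorem pvFindUnique (l sub : List Char) (k : Nat) (h1 : sub <+: l.drop k)
    (h2 : ∀ i < k, ¬ sub <+: l.drop i) : PySem.Chars.find l sub = k := by
  have hin : sub <:+: l := h1.isInfix.trans (List.drop_suffix k l).isInfix
  have h0 : 0 ≤ PySem.Chars.find l sub := (PySem.Chars.find_nonneg_iff l sub).mpr hin
  obtain ⟨hp, hmin⟩ := PySem.Chars.find_spec h0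
  rcases Nat.lt_trichotomy (PySem.Chars.find l sub).toNat k with h | h | h
  · exact absurd hp (h2 _ h)
  · omega
  · exact absurd h1 (hmin _ h)

theorem pvFindPrefix (l sub : List Char) (h : sub <+: l) : PySem.Chars.find l sub = 0 :=
  pvFindUnique l sub 0 (by simpa) (by omega)

theorem pvFindCons (c : Char) (rest sub : List Char) (h : ¬ sub <+: (c :: rest)) :
    PySem.Chars.find (c :: rest) sub =
      if PySem.Chars.find rest sub = -1 then -1 else PySem.Chars.find rest sub + 1 := by
  split_ifs with hr
  · rw [PySem.Chars.find_eq_neg_one_iff] at hr ⊢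
    rw [List.infix_cons_iff]
    tauto
  · have h0 : 0 ≤ PySem.Chars.find rest sub := by
      have := PySem.Chars.neg_one_le_find rest sub
      omega
    obtain ⟨hp, hmin⟩ := PySem.Chars.find_spec h0
    have := pvFindUnique (c :: rest) sub ((PySem.Chars.find rest sub).toNat + 1)
      (by simpa using hp)
      (by
        intro i hi
        cases i with
        | zero => simpa using h
        | succ j => simpa using hmin j (by omega))
    omega

-- find of a later first occurrence survives dropping a prefix of the scanned-over part
theorem pvFindDrop (l sub : List Char) (k j : Nat) (hj : j ≤ k)
    (h : PySem.Chars.find l sub = k) : PySem.Chars.find (l.drop j) sub = ((k - j : Nat) : Int) := by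
  have h0 : (0 : Int) ≤ k := by positivity
  obtain ⟨hp, hmin⟩ := PySem.Chars.find_spec (s := l) (sub := sub) (by rw [h]; positivity)
  rw [h] at hp hmin
  simp only [Int.toNat_natCast] at hp hmin
  apply pvFindUnique
  · rw [List.drop_drop]
    have hjk : j + (k - j) = k := by omega
    rw [hjk]
    exact hp
  · intro i hi
    rw [List.drop_drop]
    exact hmin (j + i) (by omega)

-- structural recursion computing body.split("<SECTION:")
def pvMapHead (f : List Char → List Char) : List (List Char) → List (List Char)
  | [] => []
  | x :: xs => f x :: xs

def pvSplitTag : List Char → List (List Char)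
  | [] => [[]]
  | c :: rest =>
      if pvTag.isPrefixOf (c :: rest) then [] :: pvSplitTag (rest.drop 8)
      else pvMapHead (c :: ·) (pvSplitTag rest)
termination_by l => l.length
decreasing_by
  · simp only [List.length_drop, List.length_cons]; omega
  · simp

theorem pvGoEq (fuel : Nat) : ∀ (l cur : List Char) (acc : List (List Char)), l.length < fuel →
    PySem.Chars.splitOn.go pvTag fuel l cur acc =
      acc.reverse ++ pvMapHead (cur.reverse ++ ·) (pvSplitTag l) := by
  induction fuel with
  | zero => intro l cur acc h; omega
  | succ f ih =>
    intro l cur acc h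
    match l with
    | [] => simp [PySem.Chars.splitOn.go, pvSplitTag, pvMapHead]
    | c :: rest =>
      rw [PySem.Chars.splitOn.go]
      by_cases hp : pvTag.isPrefixOf (c :: rest)
      · rw [if_pos hp, ih _ _ _ (by simp [pvTag] at h ⊢; omega)]
        have hd : List.drop pvTag.length (c :: rest) = rest.drop 8 := by
          simp [pvTag]
        rw [hd]
        rw [pvSplitTag]
        rw [if_pos hp]
        cases hsp : pvSplitTag (rest.drop 8) with
        | nil => simp [pvMapHead]
        | cons x xs => simp [pvMapHead]
      · rw [if_neg hp, ih _ _ _ (by simp at h ⊢; omega)]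
        rw [pvSplitTag]
        rw [if_neg hp]
        cases hsp : pvSplitTag rest with
        | nil => simp [pvMapHead]
        | cons x xs => simp [pvMapHead]

theorem pvSplitOnEq (cs : List Char) : PySem.Chars.splitOn cs pvTag = pvSplitTag cs := by
  unfold PySem.Chars.splitOn
  rw [pvGoEq _ _ _ _ (by omega)]
  cases h : pvSplitTag cs with
  | nil => simp [pvMapHead]
  | cons x xs => simp [pvMapHead]

theorem pvSplitTagNeg (l : List Char) (h : PySem.Chars.find l pvTag = -1) : pvSplitTag l = [l] := by
  induction l with
  | nil => rw [pvSplitTag]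
  | cons c rest ih =>
    rw [PySem.Chars.find_eq_neg_one_iff, List.infix_cons_iff] at h
    have hp : ¬ pvTag <+: (c :: rest) := fun hx => h (Or.inl hx)
    have hinf : ¬ pvTag <:+: rest := fun hx => h (Or.inr hx)
    rw [pvSplitTag, if_neg (by simpa [List.isPrefixOf_iff_prefix] using hp),
      ih (by rw [PySem.Chars.find_eq_neg_one_iff]; exact hinf)]
    rfl

theorem pvSplitTagPos (l : List Char) (k : Nat) (h : PySem.Chars.find l pvTag = k) :
    pvSplitTag l = l.take k :: pvSplitTag (l.drop (k + 9)) := by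
  induction l generalizing k with
  | nil =>
    exfalso
    have : ¬ pvTag <:+: ([] : List Char) := by simp [pvTag]
    have := (PySem.Chars.find_eq_neg_one_iff [] pvTag).mpr this
    omega
  | cons c rest ih =>
    by_cases hp : pvTag.isPrefixOf (c :: rest)
    · have hf : PySem.Chars.find (c :: rest) pvTag = 0 :=
        pvFindPrefix _ _ (List.isPrefixOf_iff_prefix.mp hp)
      have hk : k = 0 := by omega
      subst hk
      rw [pvSplitTag, if_pos hp]
      simp
    · have hf := pvFindCons c rest pvTag (by simpa [List.isPrefixOf_iff_prefix] using hp)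
      rw [h] at hf
      by_cases hr : PySem.Chars.find rest pvTag = -1
      · rw [if_pos hr] at hf; omega
      · rw [if_neg hr] at hf
        have h0 : 0 ≤ PySem.Chars.find rest pvTag := by
          have := PySem.Chars.neg_one_le_find rest pvTag; omega
        have hk1 : 1 ≤ k := by omega
        have hrk : PySem.Chars.find rest pvTag = ((k - 1 : Nat) : Int) := by omega
        rw [pvSplitTag, if_neg hp, ih _ hrk]
        have hkk : k = (k - 1) + 1 := by omega
        have e1 : List.take k (c :: rest) = c :: List.take (k - 1) rest := by
          rw [hkk, List.take_succ_cons, Nat.add_sub_cancel]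
        have e2 : List.drop (k + 9) (c :: rest) = List.drop (k - 1 + 9) rest := by
          have h9 : k + 9 = (k - 1 + 9) + 1 := by omega
          rw [h9, List.drop_succ_cons]
        rw [pvMapHead, e1, e2]

theorem pvGoMaxZero (fuel : Nat) (sep l cur : List Char) (acc : List (List Char)) :
    PySem.Chars.splitOnMax.go sep fuel 0 l cur acc = ((cur.reverse ++ l) :: acc).reverse := by
  match fuel, l with
  | 0, l => rw [PySem.Chars.splitOnMax.go]
  | f + 1, [] => rw [PySem.Chars.splitOnMax.go]; all_goals simp
  | f + 1, c :: rest => rw [PySem.Chars.splitOnMax.go]; all_goals simp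

theorem pvGoMaxOne (fuel : Nat) : ∀ (l cur : List Char) (acc : List (List Char)), l.length < fuel →
    PySem.Chars.splitOnMax.go ['>'] fuel 1 l cur acc =
      acc.reverse ++
        (if PySem.Chars.find l ['>'] = -1 then [cur.reverse ++ l]
         else [cur.reverse ++ l.take (PySem.Chars.find l ['>']).toNat,
               l.drop ((PySem.Chars.find l ['>']).toNat + 1)]) := by
  induction fuel with
  | zero => intro l cur acc h; omega
  | succ f ih =>
    intro l cur acc h
    match l with
    | [] =>
      have hf : PySem.Chars.find [] ['>'] = -1 := by
        rw [PySem.Chars.find_eq_neg_one_iff]; simp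
      rw [PySem.Chars.splitOnMax.go]
      all_goals simp [hf]
    | c :: rest =>
      rw [PySem.Chars.splitOnMax.go]
      by_cases hc : ['>'].isPrefixOf (c :: rest)
      · have hf : PySem.Chars.find (c :: rest) ['>'] = 0 :=
          pvFindPrefix _ _ (List.isPrefixOf_iff_prefix.mp hc)
        rw [if_neg (by omega), if_pos hc, pvGoMaxZero]
        simp [hf]
      · have hfc := pvFindCons c rest ['>'] (by simpa [List.isPrefixOf_iff_prefix] using hc)
        rw [if_neg (by omega), if_neg hc, ih rest (c :: cur) acc (by simp at h ⊢; omega)]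
        by_cases hr : PySem.Chars.find rest ['>'] = -1
        · rw [hr, if_pos rfl] at hfc
          simp [hfc, hr]
        · rw [if_neg hr] at hfc
          have h0 : 0 ≤ PySem.Chars.find rest ['>'] := by
            have := PySem.Chars.neg_one_le_find rest ['>']; omega
          have hne : ¬ PySem.Chars.find (c :: rest) ['>'] = -1 := by omega
          have ht : (PySem.Chars.find (c :: rest) ['>']).toNat
              = (PySem.Chars.find rest ['>']).toNat + 1 := by omega
          rw [if_neg hr, if_neg hne, ht]
          simp [List.take_succ_cons, List.drop_succ_cons]

theorem pvSplitOnMaxOne (seg : List Char) :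
    PySem.Chars.splitOnMax seg ['>'] 1 =
      (if PySem.Chars.find seg ['>'] = -1 then [seg]
       else [seg.take (PySem.Chars.find seg ['>']).toNat,
             seg.drop ((PySem.Chars.find seg ['>']).toNat + 1)]) := by
  unfold PySem.Chars.splitOnMax
  rw [if_neg (by omega)]
  have h1 : (1 : Int).toNat = 1 := rfl
  rw [h1, pvGoMaxOne (seg.length + 1) seg [] [] (by omega)]
  split_ifs <;> simp

-- structural recursion computing content.replace("</SECTION>", "")
def pvRepl : List Char → List Char
  | [] => []
  | c :: rest =>
      if pvClose.isPrefixOf (c :: rest) then pvRepl (rest.drop 9)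
      else c :: pvRepl rest
termination_by l => l.length
decreasing_by
  · simp only [List.length_drop, List.length_cons]; omega
  · simp

theorem pvReplGoEq (fuel : Nat) : ∀ (l acc : List Char), l.length ≤ fuel →
    PySem.Chars.replace.go pvClose [] fuel l acc = acc.reverse ++ pvRepl l := by
  induction fuel with
  | zero =>
    intro l acc h
    have : l = [] := by cases l <;> simp_all
    subst this
    rw [PySem.Chars.replace.go, pvRepl]
  | succ f ih =>
    intro l acc h
    match l with
    | [] => rw [PySem.Chars.replace.go, pvRepl] <;> simp
    | c :: rest =>
      rw [PySem.Chars.replace.go, pvRepl]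
      by_cases hp : pvClose.isPrefixOf (c :: rest)
      · rw [if_pos hp, if_pos hp, ih _ _ (by simp [pvClose] at h ⊢; omega)]
        have hd : List.drop pvClose.length (c :: rest) = rest.drop 9 := by simp [pvClose]
        rw [hd]
        simp
      · rw [if_neg hp, if_neg hp, ih _ _ (by simp at h ⊢; omega)]
        simp

theorem pvReplEq (cs : List Char) : PySem.Chars.replace cs pvClose [] = pvRepl cs := by
  unfold PySem.Chars.replace
  rw [if_neg (by simp [pvClose]), pvReplGoEq cs.length cs [] le_rfl]
  simp

-- A's per-part step, written out via the splits it performs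
theorem pvAStepEq (d : PySem.Dict String String) (seg : List Char) :
    pvAStep d seg =
      if PySem.Chars.find seg ['>'] = -1 then d
      else d.insert (String.ofList (PySem.Chars.strip (seg.take (PySem.Chars.find seg ['>']).toNat)))
        (String.ofList (PySem.Chars.strip (pvRepl (seg.drop ((PySem.Chars.find seg ['>']).toNat + 1))))) := by
  unfold pvAStep
  rw [pvSplitOnMaxOne]
  by_cases h : PySem.Chars.find seg ['>'] = -1 <;> simp [h, pvReplEq]

-- a closing-tag occurrence cannot straddle an opening-tag occurrence: '<' occurs in pvClose only at index 0
theorem pvNoStraddle (cs : List Char) (k : Nat) (h1 : 1 ≤ k) (h2 : k < 10)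
    (hc : pvClose <+: cs) (ht : pvTag <+: cs.drop k) : False := by
  obtain ⟨t, ht'⟩ := hc
  obtain ⟨u, hu⟩ := ht
  have hdrop : cs.drop k = pvClose.drop k ++ t := by
    rw [← ht', List.drop_append_of_le_length (by simp [pvClose]; omega)]
  rw [hdrop] at hu
  have : (pvClose.drop k ++ t)[0]? = some '<' := by
    rw [← hu]
    simp [pvTag]
  have hlen : 0 < (pvClose.drop k).length := by simp [pvClose]; omega
  rw [List.getElem?_append_left hlen] at this
  have h2' : pvClose[k]? = some '<' := by
    rw [← this, List.getElem?_drop]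
    simp
  interval_cases k <;> simp [pvClose] at h2'

-- a closing tag at the head is skipped whole by pvRepl
theorem pvReplClosePrefix (l : List Char) (h : pvClose.isPrefixOf l) :
    pvRepl l = pvRepl (l.drop 10) := by
  match l with
  | [] => simp [pvClose] at h
  | c :: rest =>
    rw [pvRepl, if_pos h]
    rfl

-- mode-2 run over a tag-free suffix: it appends replace(suffix) to content and flushes at the end
theorem pvL2 (n : Nat) : ∀ (cs : List Char), cs.length ≤ n → ∀ (name content : List Char)
    (d : PySem.Dict String String), PySem.Chars.find cs pvTag = -1 →
    pvBAuto cs 2 name content d =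
      d.insert (String.ofList (PySem.Chars.strip name))
        (String.ofList (PySem.Chars.strip (content ++ pvRepl cs))) := by
  induction n with
  | zero =>
    intro cs h name content d hf
    have : cs = [] := by cases cs <;> simp_all
    subst this
    rw [pvBAuto, pvRepl]
    simp
  | succ m ih =>
    intro cs h name content d hf
    match cs with
    | [] => rw [pvBAuto, pvRepl]; simp
    | c :: rest =>
      have hnotag : ¬ pvTag <:+: (c :: rest) := (PySem.Chars.find_eq_neg_one_iff _ _).mp hf
      have hpt : ¬ pvTag.isPrefixOf (c :: rest) := by
        rw [List.isPrefixOf_iff_prefix]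
        exact fun hx => hnotag hx.isInfix
      rw [pvBAuto, if_neg hpt, if_neg (by omega), if_pos rfl, pvRepl]
      by_cases hp : pvClose.isPrefixOf (c :: rest)
      · rw [if_pos hp, if_pos hp, ih (rest.drop 9) (by simp at h ⊢; omega) name content d
          (by
            rw [PySem.Chars.find_eq_neg_one_iff]
            intro hx
            exact hnotag (hx.trans ((List.drop_suffix 9 rest).isInfix.trans (List.suffix_cons c rest).isInfix)))]
      · rw [if_neg hp, if_neg hp, ih rest (by simp at h ⊢; omega) name (content ++ [c]) d
          (by
            rw [PySem.Chars.find_eq_neg_one_iff]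
            intro hx
            exact hnotag (hx.trans (List.suffix_cons c rest).isInfix))]
        simp

-- mode-2 run up to the next opening tag at k: flush with replace(take k) and restart in mode 1
theorem pvL2' (n : Nat) : ∀ (cs : List Char), cs.length ≤ n → ∀ (k : Nat) (name content : List Char)
    (d : PySem.Dict String String), PySem.Chars.find cs pvTag = (k : Int) →
    pvBAuto cs 2 name content d =
      pvBAuto (cs.drop (k + 9)) 1 [] []
        (d.insert (String.ofList (PySem.Chars.strip name))
          (String.ofList (PySem.Chars.strip (content ++ pvRepl (cs.take k))))) := by
  induction n with
  | zero =>
    intro cs h k name content d hf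
    have : cs = [] := by cases cs <;> simp_all
    subst this
    exfalso
    have : ¬ pvTag <:+: ([] : List Char) := by simp [pvTag]
    have := (PySem.Chars.find_eq_neg_one_iff [] pvTag).mpr this
    omega
  | succ m ih =>
    intro cs h k name content d hf
    match cs with
    | [] =>
      exfalso
      have : ¬ pvTag <:+: ([] : List Char) := by simp [pvTag]
      have := (PySem.Chars.find_eq_neg_one_iff [] pvTag).mpr this
      omega
    | c :: rest =>
      obtain ⟨hocc, hmin⟩ := PySem.Chars.find_spec (s := c :: rest) (sub := pvTag) (by rw [hf]; positivity)
      rw [hf] at hocc hmin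
      simp only [Int.toNat_natCast] at hocc hmin
      by_cases hk0 : k = 0
      · subst hk0
        have hpt : pvTag.isPrefixOf (c :: rest) := by
          rw [List.isPrefixOf_iff_prefix]; simpa using hocc
        rw [pvBAuto, if_pos hpt]
        have : (c :: rest).drop 9 = rest.drop 8 := rfl
        rw [← this]
        simp [pvRepl]
      · have hpt : ¬ pvTag.isPrefixOf (c :: rest) := by
          rw [List.isPrefixOf_iff_prefix]
          intro hx
          exact hmin 0 (by omega) (by simpa using hx)
        rw [pvBAuto, if_neg hpt, if_neg (by omega), if_pos rfl]
        by_cases hp : pvClose.isPrefixOf (c :: rest)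
        · have hcpre : pvClose <+: (c :: rest) := List.isPrefixOf_iff_prefix.mp hp
          have hk10 : 10 ≤ k := by
            by_contra hlt
            exact pvNoStraddle (c :: rest) k (by omega) (by omega) hcpre hocc
          rw [if_pos hp]
          have hrest9 : rest.drop 9 = (c :: rest).drop 10 := rfl
          have hfind10 : PySem.Chars.find ((c :: rest).drop 10) pvTag = ((k - 10 : Nat) : Int) :=
            pvFindDrop (c :: rest) pvTag k 10 hk10 hf
          rw [hrest9, ih _ (by simp at h ⊢; omega) (k - 10) name content d hfind10]
          have e1 : ((c :: rest).drop 10).drop (k - 10 + 9) = (c :: rest).drop (k + 9) := by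
            rw [List.drop_drop]
            congr 1
            omega
          have e2 : pvRepl ((c :: rest).take k) = pvRepl (((c :: rest).drop 10).take (k - 10)) := by
            have hcpre' : pvClose <+: (c :: rest).take k :=
              List.prefix_take_iff.mpr ⟨hcpre, by simp [pvClose]; omega⟩
            rw [pvReplClosePrefix _ (List.isPrefixOf_iff_prefix.mpr hcpre'), List.drop_take]
          rw [e1, e2]
        · rw [if_neg hp]
          have hfind1 : PySem.Chars.find rest pvTag = ((k - 1 : Nat) : Int) := by
            have := pvFindDrop (c :: rest) pvTag k 1 (by omega) hf
            simpa using this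
          rw [ih rest (by simp at h ⊢; omega) (k - 1) name (content ++ [c]) d hfind1]
          have e1 : rest.drop (k - 1 + 9) = (c :: rest).drop (k + 9) := by
            have : k + 9 = (k - 1 + 9) + 1 := by omega
            rw [this, List.drop_succ_cons]
          have e2 : pvRepl ((c :: rest).take k) = c :: pvRepl (rest.take (k - 1)) := by
            have htk : (c :: rest).take k = c :: rest.take (k - 1) := by
              have : k = (k - 1) + 1 := by omega
              rw [this, List.take_succ_cons, Nat.add_sub_cancel]
            have hne : ¬ pvClose.isPrefixOf (c :: rest.take (k - 1)) := by
              intro hx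
              exact hp (List.isPrefixOf_iff_prefix.mpr
                ((List.isPrefixOf_iff_prefix.mp hx).trans (by
                  rw [← htk]; exact List.take_prefix k (c :: rest))))
            rw [htk, pvRepl, if_neg hne]
          rw [e1, e2]
          simp

-- mode-1 run over a tag-free suffix: scan for '>', then the mode-2 run; no '>' means no flush
theorem pvL1 (n : Nat) : ∀ (cs : List Char), cs.length ≤ n → ∀ (name : List Char)
    (d : PySem.Dict String String), PySem.Chars.find cs pvTag = -1 →
    pvBAuto cs 1 name [] d =
      if PySem.Chars.find cs ['>'] = -1 then d
      else d.insert (String.ofList (PySem.Chars.strip (name ++ cs.take (PySem.Chars.find cs ['>']).toNat)))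
        (String.ofList (PySem.Chars.strip (pvRepl (cs.drop ((PySem.Chars.find cs ['>']).toNat + 1))))) := by
  induction n with
  | zero =>
    intro cs h name d hf
    have : cs = [] := by cases cs <;> simp_all
    subst this
    have hg : PySem.Chars.find ([] : List Char) ['>'] = -1 := by
      rw [PySem.Chars.find_eq_neg_one_iff]; simp
    rw [pvBAuto, if_neg (by decide), hg, if_pos rfl]
  | succ m ih =>
    intro cs h name d hf
    match cs with
    | [] =>
      have hg : PySem.Chars.find ([] : List Char) ['>'] = -1 := by
        rw [PySem.Chars.find_eq_neg_one_iff]; simp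
      rw [pvBAuto, if_neg (by decide), hg, if_pos rfl]
    | c :: rest =>
      have hnotag : ¬ pvTag <:+: (c :: rest) := (PySem.Chars.find_eq_neg_one_iff _ _).mp hf
      have hpt : ¬ pvTag.isPrefixOf (c :: rest) := by
        rw [List.isPrefixOf_iff_prefix]
        exact fun hx => hnotag hx.isInfix
      have hfr : PySem.Chars.find rest pvTag = -1 := by
        rw [PySem.Chars.find_eq_neg_one_iff]
        intro hx
        exact hnotag (hx.trans (List.suffix_cons c rest).isInfix)
      rw [pvBAuto, if_neg hpt, if_pos rfl]
      by_cases hc : c = '>'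
      · rw [if_pos hc, pvL2 rest.length rest le_rfl name [] d hfr]
        have hg : PySem.Chars.find (c :: rest) ['>'] = 0 :=
          pvFindPrefix _ _ (by rw [hc]; exact ⟨rest, rfl⟩)
        rw [hg, if_neg (by omega)]
        simp
      · rw [if_neg hc, ih rest (by simp at h ⊢; omega) (name ++ [c]) d hfr]
        have hfc := pvFindCons c rest ['>'] (by
          intro hx
          obtain ⟨t, ht⟩ := hx
          simp at ht
          exact hc ht.1.symm)
        by_cases hr : PySem.Chars.find rest ['>'] = -1
        · rw [hr, if_pos rfl] at hfc
          rw [if_pos hr, hfc, if_pos rfl]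
        · rw [if_neg hr] at hfc
          have h0 : 0 ≤ PySem.Chars.find rest ['>'] := by
            have := PySem.Chars.neg_one_le_find rest ['>']; omega
          have hne : ¬ PySem.Chars.find (c :: rest) ['>'] = -1 := by omega
          have ht : (PySem.Chars.find (c :: rest) ['>']).toNat
              = (PySem.Chars.find rest ['>']).toNat + 1 := by omega
          rw [if_neg hr, if_neg hne, ht]
          simp [List.take_succ_cons, List.drop_succ_cons]

-- mode-1 run up to the next opening tag at k: scan take k for '>', flush only if found, restart
theorem pvL1' (n : Nat) : ∀ (cs : List Char), cs.length ≤ n → ∀ (k : Nat) (name : List Char)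
    (d : PySem.Dict String String), PySem.Chars.find cs pvTag = (k : Int) →
    pvBAuto cs 1 name [] d =
      pvBAuto (cs.drop (k + 9)) 1 [] []
        (if PySem.Chars.find (cs.take k) ['>'] = -1 then d
         else d.insert (String.ofList (PySem.Chars.strip (name ++ (cs.take k).take (PySem.Chars.find (cs.take k) ['>']).toNat)))
           (String.ofList (PySem.Chars.strip (pvRepl ((cs.take k).drop ((PySem.Chars.find (cs.take k) ['>']).toNat + 1)))))) := by
  induction n with
  | zero =>
    intro cs h k name d hf
    have : cs = [] := by cases cs <;> simp_all
    subst this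
    exfalso
    have : ¬ pvTag <:+: ([] : List Char) := by simp [pvTag]
    have := (PySem.Chars.find_eq_neg_one_iff [] pvTag).mpr this
    omega
  | succ m ih =>
    intro cs h k name d hf
    match cs with
    | [] =>
      exfalso
      have : ¬ pvTag <:+: ([] : List Char) := by simp [pvTag]
      have := (PySem.Chars.find_eq_neg_one_iff [] pvTag).mpr this
      omega
    | c :: rest =>
      obtain ⟨hocc, hmin⟩ := PySem.Chars.find_spec (s := c :: rest) (sub := pvTag) (by rw [hf]; positivity)
      rw [hf] at hocc hmin
      simp only [Int.toNat_natCast] at hocc hmin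
      by_cases hk0 : k = 0
      · subst hk0
        have hpt : pvTag.isPrefixOf (c :: rest) := by
          rw [List.isPrefixOf_iff_prefix]; simpa using hocc
        have hg : PySem.Chars.find (([] : List Char)) ['>'] = -1 := by
          rw [PySem.Chars.find_eq_neg_one_iff]; simp
        rw [pvBAuto, if_pos hpt]
        simp only [List.take_zero, hg]
        rfl
      · have hpt : ¬ pvTag.isPrefixOf (c :: rest) := by
          rw [List.isPrefixOf_iff_prefix]
          intro hx
          exact hmin 0 (by omega) (by simpa using hx)
        have htk : (c :: rest).take k = c :: rest.take (k - 1) := by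
          have : k = (k - 1) + 1 := by omega
          rw [this, List.take_succ_cons, Nat.add_sub_cancel]
        have hfind1 : PySem.Chars.find rest pvTag = ((k - 1 : Nat) : Int) := by
          have := pvFindDrop (c :: rest) pvTag k 1 (by omega) hf
          simpa using this
        have e1 : rest.drop (k - 1 + 9) = (c :: rest).drop (k + 9) := by
          have : k + 9 = (k - 1 + 9) + 1 := by omega
          rw [this, List.drop_succ_cons]
        rw [pvBAuto, if_neg hpt, if_pos rfl]
        by_cases hc : c = '>'
        · rw [if_pos hc, pvL2' rest.length rest le_rfl (k - 1) name [] d hfind1]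
          have hg : PySem.Chars.find ((c :: rest).take k) ['>'] = 0 := by
            rw [htk]
            exact pvFindPrefix _ _ (by rw [hc]; exact ⟨rest.take (k - 1), rfl⟩)
          rw [hg, if_neg (by omega), e1]
          simp [htk]
        · rw [if_neg hc, ih rest (by simp at h ⊢; omega) (k - 1) (name ++ [c]) d hfind1, e1]
          have hfc := pvFindCons c (rest.take (k - 1)) ['>'] (by
            intro hx
            obtain ⟨t, ht⟩ := hx
            simp at ht
            exact hc ht.1.symm)
          rw [← htk] at hfc
          by_cases hr : PySem.Chars.find (rest.take (k - 1)) ['>'] = -1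
          · rw [hr, if_pos rfl] at hfc
            rw [if_pos hr, hfc, if_pos rfl]
          · rw [if_neg hr] at hfc
            have h0 : 0 ≤ PySem.Chars.find (rest.take (k - 1)) ['>'] := by
              have := PySem.Chars.neg_one_le_find (rest.take (k - 1)) ['>']; omega
            have hne : ¬ PySem.Chars.find ((c :: rest).take k) ['>'] = -1 := by omega
            have htn : (PySem.Chars.find ((c :: rest).take k) ['>']).toNat
                = (PySem.Chars.find (rest.take (k - 1)) ['>']).toNat + 1 := by omega
            rw [if_neg hr, if_neg hne, htn, htk]
            simp [List.take_succ_cons, List.drop_succ_cons]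

-- a mode-1 start equals A's fold over the remaining parts
theorem pvB1 (n : Nat) : ∀ (cs : List Char), cs.length ≤ n → ∀ (d : PySem.Dict String String),
    pvBAuto cs 1 [] [] d = (pvSplitTag cs).foldl pvAStep d := by
  induction n with
  | zero =>
    intro cs h d
    have : cs = [] := by cases cs <;> simp_all
    subst this
    have hf : PySem.Chars.find ([] : List Char) pvTag = -1 := by
      rw [PySem.Chars.find_eq_neg_one_iff]; simp [pvTag]
    rw [pvSplitTagNeg _ hf, pvL1 0 [] le_rfl [] d hf]
    simp only [List.foldl_cons, List.foldl_nil]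
    rw [pvAStepEq]
    simp
  | succ m ih =>
    intro cs h d
    by_cases hf : PySem.Chars.find cs pvTag = -1
    · rw [pvSplitTagNeg _ hf, pvL1 cs.length cs le_rfl [] d hf]
      simp only [List.foldl_cons, List.foldl_nil]
      rw [pvAStepEq]
      simp
    · have h0 : 0 ≤ PySem.Chars.find cs pvTag := by
        have := PySem.Chars.neg_one_le_find cs pvTag; omega
      have hk : PySem.Chars.find cs pvTag = ((PySem.Chars.find cs pvTag).toNat : Int) := by omega
      have hin : pvTag <:+: cs := (PySem.Chars.find_nonneg_iff cs pvTag).mp h0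
      have hlen : 9 ≤ cs.length := by simpa [pvTag] using hin.length_le
      rw [pvSplitTagPos _ (PySem.Chars.find cs pvTag).toNat hk, List.foldl_cons,
        pvL1' cs.length cs le_rfl (PySem.Chars.find cs pvTag).toNat [] d hk,
        ih (cs.drop ((PySem.Chars.find cs pvTag).toNat + 9)) (by simp at h ⊢; omega),
        pvAStepEq]
      simp

-- the mode-0 prefix run ignores everything before the first tag, like A's [1:]
theorem pvB0 (n : Nat) : ∀ (cs : List Char), cs.length ≤ n → ∀ (name content : List Char)
    (d : PySem.Dict String String),
    pvBAuto cs 0 name content d = ((pvSplitTag cs).drop 1).foldl pvAStep d := by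
  induction n with
  | zero =>
    intro cs h name content d
    have : cs = [] := by cases cs <;> simp_all
    subst this
    rw [pvBAuto, if_neg (by decide), pvSplitTag]
    simp
  | succ m ih =>
    intro cs h name content d
    match cs with
    | [] =>
      rw [pvBAuto, if_neg (by decide), pvSplitTag]
      simp
    | c :: rest =>
      by_cases hp : pvTag.isPrefixOf (c :: rest)
      · rw [pvBAuto, if_pos hp, pvSplitTag, if_pos hp]
        simp only [List.drop_succ_cons, List.drop_zero]
        exact pvB1 (rest.drop 8).length _ le_rfl d
      · rw [pvBAuto, if_neg hp, if_neg (by decide), if_neg (by decide),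
          ih rest (by simp at h ⊢; omega) name content d, pvSplitTag, if_neg hp]
        cases hsp : pvSplitTag rest with
        | nil =>
          exfalso
          have h1 := pvSplitTagNeg rest
          have h2 := pvSplitTagPos rest
          by_cases hfr : PySem.Chars.find rest pvTag = -1
          · rw [h1 hfr] at hsp; simp at hsp
          · have h0 : 0 ≤ PySem.Chars.find rest pvTag := by
              have := PySem.Chars.neg_one_le_find rest pvTag; omega
            rw [h2 (PySem.Chars.find rest pvTag).toNat (by omega)] at hsp
            simp at hsp
        | cons x xs => simp [pvMapHead]

-- ===== VERDICT (by name: the statement is the Claim_ definition above) =====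
theorem parse_persona_body_spec : Claim_equal_parse_persona_body := by
  intro body _
  unfold Spec_parse_persona_body parse_persona_body parse_persona_body_alt
  rw [pvSplitOnEq, pvB0 body.toList.length body.toList le_rfl [] [] PySem.Dict.empty]
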